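-- pv_equiv track=rewrite | github.com/NiskashY/water-quality-heatmap | logic/cron/calculate_water_parameters_task.py | count_consecutive_none
-- ===== SOURCE A (Python) =====
-- def count_consecutive_none(arr):
--     max_count = current_count = 0
--     for item in arr:
--         if item is None:
--             current_count += 1
--             max_count = max(max_count, current_count)
--         else:
--             current_count = 0
--     return max_count
-- ===== SOURCE B (Python) =====
-- def count_consecutive_none(arr):
--     # two-pointer run scan: find each maximal None-run [i, j), keep the longest
--     best = 0
--     i = 0
--     n = len(arr)
--     while i < n:
--         if arr[i] is None:
--             j = i + 1
--             while j < n and arr[j] is None: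
--                 j += 1
--             best = max(best, j - i)
--             i = j
--         else:
--             i += 1
--     return best
-- ===== Notes on version B (the rewrite author's own statement) =====
-- stated objective: alternative
-- what changed: A keeps a running counter and a running maximum in one element-by-element fold; B is a two-pointer scan that locates each maximal None-run, measures it whole, and jumps past it.
import Mathlib
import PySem

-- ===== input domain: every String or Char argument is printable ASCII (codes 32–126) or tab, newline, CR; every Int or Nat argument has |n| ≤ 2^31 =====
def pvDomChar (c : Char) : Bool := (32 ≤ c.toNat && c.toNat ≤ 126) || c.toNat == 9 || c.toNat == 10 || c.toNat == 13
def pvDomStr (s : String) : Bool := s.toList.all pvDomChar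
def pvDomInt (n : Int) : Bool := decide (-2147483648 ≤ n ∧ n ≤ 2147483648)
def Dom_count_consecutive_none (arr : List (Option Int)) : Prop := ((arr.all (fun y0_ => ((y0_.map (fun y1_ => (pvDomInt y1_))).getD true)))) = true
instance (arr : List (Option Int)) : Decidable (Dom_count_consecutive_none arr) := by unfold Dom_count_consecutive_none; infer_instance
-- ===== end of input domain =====

-- B replaces A's fold with a running counter+maximum by a recursion that splits off each maximal leading None-run (alternative decomposition; not faster).


-- ===== PORT A =====
def count_consecutive_none (arr : List (Option Int)) : Int :=
  (arr.foldl (fun (s : Int × Int) item =>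
      match item with
      | none => (max s.1 (s.2 + 1), s.2 + 1)
      | some _ => (s.1, 0)) (0, 0)).1

-- ===== PORT B =====
-- length of the leading None-run (B's inner `while j < n and arr[j] is None` loop)
def noneRun : List (Option Int) → Nat
  | none :: t => 1 + noneRun t
  | _ => 0

-- B's outer while loop: the unscanned suffix stands for the index i, best is the accumulator
def altGo (best : Int) : List (Option Int) → Int
  | [] => best
  | none :: rest =>
      let k := noneRun rest
      altGo (max best (((1 + k : Nat) : Int))) (rest.drop k)
  | some _ :: rest => altGo best rest
  termination_by l => l.length
  decreasing_by
  · simp only [List.length_cons, List.length_drop]; omega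
  · simp

def count_consecutive_none_alt (arr : List (Option Int)) : Int := altGo 0 arr

-- ===== PRECONDITION & SPEC =====
def Spec_count_consecutive_none (arr : List (Option Int)) (out : Int) : Prop := out = count_consecutive_none_alt arr
instance (arr : List (Option Int)) (out : Int) : Decidable (Spec_count_consecutive_none arr out) := by unfold Spec_count_consecutive_none; infer_instance

-- ===== CLAIM (what is proved, stated in full; the proofs are below) =====
def Claim_equal_count_consecutive_none : Prop := ∀ (arr : List (Option Int)), Dom_count_consecutive_none arr → Spec_count_consecutive_none arr (count_consecutive_none arr)

-- ===== LEMMAS AND PROOFS =====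

-- g c l = the maximum running counter value reached, starting from counter c
def pvG (c : Int) : List (Option Int) → Int
  | [] => c
  | none :: t => pvG (c + 1) t
  | some _ :: t => max c (pvG 0 t)

theorem pvG_ge (l : List (Option Int)) : ∀ c : Int, c ≤ pvG c l := by
  induction l with
  | nil => intro c; simp [pvG]
  | cons h t ih =>
    intro c
    cases h with
    | none => have := ih (c + 1); simp [pvG]; omega
    | some v => simp [pvG]

theorem foldA_eq (l : List (Option Int)) : ∀ m c : Int, 0 ≤ c → c ≤ m →
    (l.foldl (fun (s : Int × Int) item =>
      match item with
      | none => (max s.1 (s.2 + 1), s.2 + 1)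
      | some _ => (s.1, 0)) (m, c)).1 = max m (pvG c l) := by
  induction l with
  | nil => intro m c h0 h; simp [pvG]; omega
  | cons x t ih =>
    intro m c h0 h
    cases x with
    | none =>
      have h1 := ih (max m (c + 1)) (c + 1) (by omega) (by omega)
      have h2 := pvG_ge t (c + 1)
      simp only [List.foldl_cons] at *
      rw [h1]; simp [pvG]; omega
    | some v =>
      have h1 := ih m 0 (by omega) (by omega)
      have h2 := pvG_ge t (0 : Int)
      simp only [List.foldl_cons] at *
      rw [h1]; simp [pvG]; omega

-- splitting lemma: pvG from counter c equals max of (c + leading run) and pvG 0 of the remainder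
theorem pvG_split (l : List (Option Int)) : ∀ c : Int, 0 ≤ c →
    pvG c l = max (c + (noneRun l : Int)) (pvG 0 (l.drop (noneRun l))) := by
  induction l with
  | nil => intro c h; simp [pvG, noneRun]; omega
  | cons x t ih =>
    intro c h
    cases x with
    | none =>
      have h1 := ih (c + 1) (by omega)
      simp only [pvG, noneRun, h1]
      have : (((1 + noneRun t : Nat)) : Int) = 1 + (noneRun t : Int) := by push_cast; ring
      rw [this]
      have hd : (none :: t).drop (1 + noneRun t) = t.drop (noneRun t) := by
        rw [Nat.add_comm]; simp [List.drop_succ_cons]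
      rw [hd]; omega
    | some v =>
      have h2 := pvG_ge t (0 : Int)
      simp [pvG, noneRun]
      omega

theorem altGo_eq_pvG (n : Nat) : ∀ (l : List (Option Int)) (best : Int), l.length ≤ n → 0 ≤ best →
    altGo best l = max best (pvG 0 l) := by
  induction n with
  | zero =>
    intro l best hl hb
    have : l = [] := by cases l <;> simp_all
    subst this; simp [altGo, pvG]; omega
  | succ n ih =>
    intro l best hl hb
    cases l with
    | nil => simp [altGo, pvG]; omega
    | cons x t =>
      cases x with
      | none =>
        have hlen : (t.drop (noneRun t)).length ≤ n := by
          simp only [List.length_cons] at hl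
          simp only [List.length_drop]; omega
        have hc : (((1 + noneRun t : Nat)) : Int) = 1 + (noneRun t : Int) := by push_cast; ring
        have h1 := ih (t.drop (noneRun t)) (max best (((1 + noneRun t : Nat)) : Int)) hlen (by omega)
        rw [altGo]
        simp only [h1]
        have h2 := pvG_split t 1 (by omega)
        have h3 : pvG 0 (none :: t) = pvG 1 t := by simp [pvG]
        rw [h3, h2]
        omega
      | some v =>
        have h1 := ih t best (by simp at hl; omega) hb
        have h2 := pvG_ge t (0 : Int)
        rw [altGo, h1]
        simp [pvG]; omega

-- ===== VERDICT (by name: the statement is the Claim_ definition above) =====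
theorem count_consecutive_none_spec : Claim_equal_count_consecutive_none := by
  intro arr _
  unfold Spec_count_consecutive_none count_consecutive_none
  unfold count_consecutive_none_alt
  rw [foldA_eq arr 0 0 (by omega) (by omega), altGo_eq_pvG arr.length arr 0 (le_refl _) (by omega)]
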